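-- pv_equiv track=rewrite | github.com/ravenoak/autoresearch | src/autoresearch/search/core.py | _canonicalise_storage_hints
-- ===== SOURCE A (Python) =====
-- from typing import (
--     Any,
--     Callable,
--     ClassVar,
--     Concatenate,
--     Dict,
--     Generic,
--     Iterator,
--     List,
--     Literal,
--     Optional,
--     ParamSpec,
--     Protocol,
--     Sequence,
--     Tuple,
--     NamedTuple,
--     TypedDict,
--     TypeVar,
--     cast,
--     TypeAlias,
-- )
--
-- def _canonicalise_storage_hints(
--     storage_hints: Sequence[str] | None,
-- ) -> Tuple[str, ...]:
--     """Return a sorted tuple of unique storage hints."""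
--
--     if not storage_hints:
--         return ()
--
--     seen: list[str] = []
--     for hint in storage_hints:
--         if hint not in seen:
--             seen.append(hint)
--     return tuple(sorted(seen))
-- ===== SOURCE B (Python) =====
-- def _canonicalise_storage_hints(storage_hints):
--     """Return a sorted tuple of unique storage hints (sort first, collapse adjacent duplicates)."""
--     if not storage_hints:
--         return ()
--     out = []
--     for h in sorted(storage_hints):
--         if not out or out[-1] != h:
--             out.append(h)
--     return tuple(out)
-- ===== Notes on version B (the rewrite author's own statement) =====
-- stated objective: faster
-- what changed: A dedups by a membership scan over a growing 'seen' list (quadratic) and then sorts; B sorts first and removes duplicates in one linear pass by comparing each element with the last one kept.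
import Mathlib
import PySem

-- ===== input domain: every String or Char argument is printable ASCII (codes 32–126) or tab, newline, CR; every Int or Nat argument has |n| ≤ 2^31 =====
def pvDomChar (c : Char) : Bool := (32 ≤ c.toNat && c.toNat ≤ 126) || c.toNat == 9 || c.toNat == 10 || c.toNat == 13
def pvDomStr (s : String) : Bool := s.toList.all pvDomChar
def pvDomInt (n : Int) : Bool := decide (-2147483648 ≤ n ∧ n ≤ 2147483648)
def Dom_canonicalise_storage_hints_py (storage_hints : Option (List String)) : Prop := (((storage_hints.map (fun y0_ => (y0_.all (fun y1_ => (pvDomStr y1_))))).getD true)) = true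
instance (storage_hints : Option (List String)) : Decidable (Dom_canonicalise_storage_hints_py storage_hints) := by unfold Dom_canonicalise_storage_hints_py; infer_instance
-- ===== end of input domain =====

-- B sorts first and collapses adjacent duplicates in one pass, instead of A's
-- membership-scan dedup followed by a sort (objective: alternative; return value only).

-- ===== PORT A =====
def canonicalise_storage_hints_py (storage_hints : Option (List String)) : List String :=
  match storage_hints with
  | none => []
  | some l =>
    if l = [] then []
    else
      let seen := l.foldl (fun s hint => if hint ∈ s then s else s ++ [hint]) []
      PySem.List.sorted seen (fun x => x) false

-- ===== PORT B =====
def canonicalise_storage_hints_py_alt (storage_hints : Option (List String)) : List String :=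
  match storage_hints with
  | none => []
  | some l =>
    if l = [] then []
    else
      (PySem.List.sorted l (fun x => x) false).foldl
        (fun out h => if out.getLast? = some h then out else out ++ [h]) []

-- ===== PRECONDITION & SPEC =====
def Spec_canonicalise_storage_hints_py (storage_hints : Option (List String)) (out : List String) : Prop := out = canonicalise_storage_hints_py_alt storage_hints
instance (storage_hints : Option (List String)) (out : List String) : Decidable (Spec_canonicalise_storage_hints_py storage_hints out) := by unfold Spec_canonicalise_storage_hints_py; infer_instance

-- ===== CLAIM (what is proved, stated in full; the proofs are below) =====
def Claim_equal_canonicalise_storage_hints_py : Prop := ∀ (storage_hints : Option (List String)), Dom_canonicalise_storage_hints_py storage_hints → Spec_canonicalise_storage_hints_py storage_hints (canonicalise_storage_hints_py storage_hints)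

-- ===== LEMMAS AND PROOFS =====

-- A's dedup fold yields a Nodup list with the same members as acc ++ l.
theorem pv_dedup_fold (l : List String) : ∀ (s : List String), s.Nodup →
    (l.foldl (fun s hint => if hint ∈ s then s else s ++ [hint]) s).Nodup ∧
    (∀ y, y ∈ l.foldl (fun s hint => if hint ∈ s then s else s ++ [hint]) s ↔ y ∈ s ∨ y ∈ l) := by
  induction l with
  | nil => intro s hs; simpa using hs
  | cons h t ih =>
    intro s hs
    simp only [List.foldl_cons]
    by_cases hm : h ∈ s
    · simp only [if_pos hm]
      refine ⟨(ih s hs).1, fun y => ?_⟩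
      rw [(ih s hs).2]
      constructor
      · rintro (hy | hy) <;> simp [hy]
      · rintro (hy | hy)
        · exact Or.inl hy
        · rcases List.mem_cons.mp hy with rfl | hy
          · exact Or.inl hm
          · exact Or.inr hy
    · simp only [if_neg hm]
      have hns : (s ++ [h]).Nodup := by
        refine hs.append (List.nodup_singleton h) ?_
        intro a ha hb
        rw [List.mem_singleton] at hb
        exact hm (hb ▸ ha)
      refine ⟨(ih _ hns).1, fun y => ?_⟩
      rw [(ih _ hns).2]
      simp only [List.mem_append, List.mem_cons]
      tauto

-- In a strictly increasing list every member is ≤ the last element.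
theorem pv_le_getLast? : ∀ (acc : List String), acc.Pairwise (· < ·) →
    ∀ a ∈ acc, ∀ m, acc.getLast? = some m → a ≤ m
  | [], _ => by simp
  | x :: t, hp => by
    intro a ha m hm
    cases t with
    | nil =>
      simp only [List.mem_singleton] at ha
      simp only [List.getLast?_singleton, Option.some.injEq] at hm
      exact le_of_eq (ha.trans hm)
    | cons y u =>
      have hm' : (y :: u).getLast? = some m := by
        simpa [List.getLast?_cons_cons] using hm
      rcases List.mem_cons.mp ha with rfl | ha
      · exact le_of_lt ((List.pairwise_cons.mp hp).1 m (List.mem_of_getLast? hm'))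
      · exact pv_le_getLast? (y :: u) (List.pairwise_cons.mp hp).2 a ha m hm'

-- B's collapsing fold over a ≤-sorted list: invariant on the accumulator.
theorem pv_collapse_fold (xs : List String) : ∀ (acc : List String),
    xs.Pairwise (· ≤ ·) → acc.Pairwise (· < ·) →
    (∀ a ∈ acc, ∀ x ∈ xs, a ≤ x) →
    (xs.foldl (fun out h => if out.getLast? = some h then out else out ++ [h]) acc).Pairwise (· < ·) ∧
    (∀ y, y ∈ xs.foldl (fun out h => if out.getLast? = some h then out else out ++ [h]) acc ↔ y ∈ acc ∨ y ∈ xs) := by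
  induction xs with
  | nil => intro acc _ hacc _; simpa using hacc
  | cons h t ih =>
    intro acc hxs hacc hle
    have hxt : t.Pairwise (· ≤ ·) := (List.pairwise_cons.mp hxs).2
    have hht : ∀ x ∈ t, h ≤ x := (List.pairwise_cons.mp hxs).1
    simp only [List.foldl_cons]
    by_cases hg : acc.getLast? = some h
    · simp only [if_pos hg]
      have hmem : h ∈ acc := List.mem_of_getLast? hg
      have := ih acc hxt hacc (fun a ha x hx => hle a ha x (List.mem_cons_of_mem h hx))
      refine ⟨this.1, fun y => ?_⟩
      rw [this.2]
      constructor
      · rintro (hy | hy) <;> simp [hy]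
      · rintro (hy | hy)
        · exact Or.inl hy
        · rcases List.mem_cons.mp hy with rfl | hy
          · exact Or.inl hmem
          · exact Or.inr hy
    · simp only [if_neg hg]
      have hlt : ∀ a ∈ acc, a < h := by
        intro a ha
        have hale : a ≤ h := hle a ha h (List.mem_cons_self ..)
        rcases lt_or_eq_of_le hale with hlt | rfl
        · exact hlt
        · -- a = h ∈ acc; then the last element m satisfies a ≤ m ≤ a, so m = a, contradiction
          exfalso
          obtain ⟨m, hm⟩ := Option.isSome_iff_exists.mp
            (List.getLast?_isSome.mpr (List.ne_nil_of_mem ha))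
          have h1 : a ≤ m := pv_le_getLast? acc hacc a ha m hm
          have h2 : m ≤ a := hle m (List.mem_of_getLast? hm) a (List.mem_cons_self ..)
          exact hg ((le_antisymm h2 h1) ▸ hm)
      have hacc' : (acc ++ [h]).Pairwise (· < ·) :=
        List.pairwise_append.mpr ⟨hacc, List.pairwise_singleton _ _,
          fun a ha b hb => (List.mem_singleton.mp hb) ▸ hlt a ha⟩
      have hle' : ∀ a ∈ acc ++ [h], ∀ x ∈ t, a ≤ x := by
        intro a ha x hx
        rcases List.mem_append.mp ha with ha | ha
        · exact hle a ha x (List.mem_cons_of_mem h hx)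
        · rw [List.mem_singleton.mp ha]; exact hht x hx
      have := ih (acc ++ [h]) hxt hacc' hle'
      refine ⟨this.1, fun y => ?_⟩
      rw [this.2]
      simp only [List.mem_append, List.mem_cons]
      tauto

-- ===== VERDICT (by name: the statement is the Claim_ definition above) =====
theorem canonicalise_storage_hints_py_spec : Claim_equal_canonicalise_storage_hints_py := by
  unfold Claim_equal_canonicalise_storage_hints_py
  intro storage_hints _
  unfold Spec_canonicalise_storage_hints_py canonicalise_storage_hints_py canonicalise_storage_hints_py_alt
  cases storage_hints with
  | none => rfl
  | some l =>
    by_cases hl : l = []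
    · simp [hl]
    · simp only [if_neg hl]
      set B := (PySem.List.sorted l (fun x => x) false).foldl
        (fun out h => if out.getLast? = some h then out else out ++ [h]) [] with hB
      have hsp : (PySem.List.sorted l (fun x => x) false).Pairwise (· ≤ ·) := by
        simpa using PySem.List.sorted_pairwise l (fun x => x)
      have hcoll := pv_collapse_fold (PySem.List.sorted l (fun x => x) false) [] hsp
        (by simp) (by simp)
      have hBpair : B.Pairwise (· < ·) := hcoll.1
      have hBmem : ∀ y, y ∈ B ↔ y ∈ l := by
        intro y
        rw [hB, hcoll.2]
        simp [PySem.List.mem_sorted]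
      have hded := pv_dedup_fold l [] (by simp)
      have hseenmem : ∀ y, y ∈ l.foldl (fun s hint => if hint ∈ s then s else s ++ [hint]) [] ↔ y ∈ l := by
        intro y; rw [hded.2]; simp
      have hperm : B.Perm (l.foldl (fun s hint => if hint ∈ s then s else s ++ [hint]) []) := by
        rw [List.perm_ext_iff_of_nodup (hBpair.imp ne_of_lt) hded.1]
        intro y; rw [hBmem, hseenmem]
      exact PySem.List.sorted_eq_of_perm_of_pairwise_lt _ _ (fun x => x) hperm hBpair
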